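-- pv_equiv track=rewrite | github.com/MrBrantCode/unitest_baseline | mut_generate/mist_train_cf/cf_17105/solution.py | modify_array
-- ===== SOURCE A (Python) =====
-- def modify_array(arr):
--     if len(arr) == 0:
--         return []
--
--     first = arr[0]
--     if first == 0:
--         return modify_array(arr[1:])
--
--     if first > 5:
--         first += 1
--
--     modified_arr = modify_array(arr[1:])
--     if first in modified_arr:
--         return modified_arr
--
--     return [first] + modified_arr
-- ===== SOURCE B (Python) =====
-- def modify_array(arr):
--     t = [x + 1 if x > 5 else x for x in arr if x != 0]
--     seen = set()
--     out = []
--     for v in reversed(t):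
--         if v not in seen:
--             seen.add(v)
--             out.append(v)
--     out.reverse()
--     return out
-- ===== Notes on version B (the rewrite author's own statement) =====
-- stated objective: faster
-- what changed: Replaces A's O(n^2) recursion with a membership scan over the deduplicated suffix by one comprehension pass plus one reversed pass using a hash set of seen values (keep-last dedup in expected O(n)).
import Mathlib
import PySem

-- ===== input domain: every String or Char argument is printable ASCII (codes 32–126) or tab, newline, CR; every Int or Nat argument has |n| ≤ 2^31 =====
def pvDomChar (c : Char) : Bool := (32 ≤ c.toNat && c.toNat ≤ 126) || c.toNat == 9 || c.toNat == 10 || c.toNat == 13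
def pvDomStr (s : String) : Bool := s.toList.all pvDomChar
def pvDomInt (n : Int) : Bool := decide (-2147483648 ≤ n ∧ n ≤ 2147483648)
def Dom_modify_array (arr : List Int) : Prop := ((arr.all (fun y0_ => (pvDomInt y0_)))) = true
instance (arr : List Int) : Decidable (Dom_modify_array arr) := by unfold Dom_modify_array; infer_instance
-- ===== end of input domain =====

-- B replaces A's recursion-with-membership-scan by one transform pass plus one
-- reversed pass over a hash set of seen values (keep-last dedup); measured faster.

-- ===== PORT A =====
def modify_array (arr : List Int) : List Int :=
  match arr with
  | [] => []
  | a :: rest =>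
    if a = 0 then modify_array rest
    else
      let first := if a > 5 then a + 1 else a
      let m := modify_array rest
      if first ∈ m then m else first :: m

-- ===== PORT B =====
def modify_array_alt (arr : List Int) : List Int :=
  let t := arr.filterMap (fun x => if x ≠ 0 then some (if x > 5 then x + 1 else x) else none)
  let st := t.reverse.foldl
    (fun (st : PySem.Set Int × List Int) v =>
      if PySem.Set.contains st.1 v then st else (PySem.Set.add st.1 v, st.2 ++ [v]))
    (PySem.Set.empty, [])
  st.2.reverse

-- ===== PRECONDITION & SPEC =====
def Spec_modify_array (arr : List Int) (out : List Int) : Prop := out = modify_array_alt arr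
instance (arr : List Int) (out : List Int) : Decidable (Spec_modify_array arr out) := by unfold Spec_modify_array; infer_instance

-- ===== CLAIM (what is proved, stated in full; the proofs are below) =====
def Claim_equal_modify_array : Prop := ∀ (arr : List Int), Dom_modify_array arr → Spec_modify_array arr (modify_array arr)

-- ===== LEMMAS AND PROOFS =====

-- the transformed/filtered list both programs conceptually work over
def pvT (arr : List Int) : List Int :=
  arr.filterMap (fun x => if x ≠ 0 then some (if x > 5 then x + 1 else x) else none)

-- keep-last dedup, the shape of A's recursion on the transformed list
def dedupLast : List Int → List Int
  | [] => []
  | v :: r =>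
    let m := dedupLast r
    if v ∈ m then m else v :: m

theorem modify_array_eq_dedupLast (arr : List Int) :
    modify_array arr = dedupLast (pvT arr) := by
  induction arr with
  | nil => rfl
  | cons a rest ih =>
    by_cases h0 : a = 0
    · simp [modify_array, pvT, h0, ih]
    · simp only [modify_array, h0, if_false, pvT, List.filterMap_cons, ne_eq,
        not_false_eq_true, if_true, dedupLast]
      rw [ih]
      rfl

-- keep-first dedup (what the reversed pass computes), filter formulation
def kf : List Int → List Int
  | [] => []
  | v :: l => v :: kf (l.filter (fun x => x ≠ v))
  termination_by l => l.length
  decreasing_by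
    simpa using Nat.lt_succ_of_le ((List.length_filter_le _ _).trans (by simp))

theorem mem_kf : ∀ (l : List Int) (x : Int), x ∈ kf l ↔ x ∈ l
  | [], x => by rw [kf.eq_1]
  | v :: l, x => by
    rw [kf.eq_2]
    simp only [List.mem_cons, mem_kf (l.filter (fun y => y ≠ v)) x, List.mem_filter,
      decide_eq_true_eq]
    by_cases hxv : x = v
    · simp [hxv]
    · simp [hxv]
  termination_by l => l.length
  decreasing_by
    simpa using Nat.lt_succ_of_le ((List.length_filter_le _ _).trans (by simp))

theorem kf_append_singleton : ∀ (l : List Int) (v : Int),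
    kf (l ++ [v]) = if v ∈ l then kf l else kf l ++ [v]
  | [], v => by
    rw [List.nil_append, kf.eq_2]
    simp [kf.eq_1]
  | u :: l', v => by
    simp only [List.cons_append]
    rw [kf.eq_2, kf.eq_2]
    simp only [List.filter_append, List.filter_cons, List.filter_nil]
    by_cases hv : v = u
    · simp [hv]
    · have hd : (decide (v ≠ u)) = true := by simpa using hv
      simp only [hd, if_true]
      rw [kf_append_singleton (l'.filter (fun x => x ≠ u)) v]
      have hmem : v ∈ l'.filter (fun x => decide (x ≠ u)) ↔ v ∈ l' := by
        simp [List.mem_filter, hv]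
      by_cases hm : v ∈ l'
      · simp [hm, hv]
      · simp [hm, hv]
  termination_by l _ => l.length
  decreasing_by
    simpa using Nat.lt_succ_of_le ((List.length_filter_le _ _).trans (by simp))

theorem dedupLast_eq_kf_reverse (l : List Int) :
    dedupLast l = (kf l.reverse).reverse := by
  induction l with
  | nil =>
    have hk : kf [] = [] := by rw [kf.eq_1]
    simp [dedupLast, hk]
  | cons v r ih =>
    simp only [dedupLast, List.reverse_cons, kf_append_singleton, List.mem_reverse]
    by_cases h : v ∈ r
    · simp [mem_kf, h, ih]
    · simp [mem_kf, h, ih]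

-- the seen-set loop of B, in pure form
def loopB (seen : PySem.Set Int) : List Int → List Int
  | [] => []
  | v :: l =>
    if v ∈ seen then loopB seen l
    else v :: loopB (PySem.Set.add seen v) l

theorem foldl_loopB (l : List Int) (s : PySem.Set Int) (out : List Int) :
    (l.foldl
      (fun (st : PySem.Set Int × List Int) v =>
        if v ∈ st.1 then st else (PySem.Set.add st.1 v, st.2 ++ [v]))
      (s, out)).2 = out ++ loopB s l := by
  induction l generalizing s out with
  | nil => simp [loopB]
  | cons v l ih =>
    simp only [List.foldl_cons, loopB]
    by_cases h : v ∈ s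
    · simp only [h, if_true]
      exact ih s out
    · simp only [h, if_false]
      rw [ih]
      simp

theorem loopB_eq_kf_filter (l : List Int) (s : PySem.Set Int) :
    loopB s l = kf (l.filter (fun x => x ∉ s)) := by
  induction l generalizing s with
  | nil =>
    have hk : kf [] = [] := by rw [kf.eq_1]
    simp [loopB, hk]
  | cons v l ih =>
    simp only [loopB, List.filter_cons]
    by_cases h : v ∈ s
    · simp only [h, if_true, not_true, decide_false]
      exact ih s
    · have hl : l.filter (fun x => decide (x ∉ PySem.Set.add s v))
          = (l.filter (fun x => decide (x ∉ s))).filter (fun x => decide (x ≠ v)) := by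
        rw [List.filter_filter]
        apply List.filter_congr
        intro x hx
        simp only [PySem.Set.mem_add]
        by_cases h1 : x ∈ s <;> by_cases h2 : x = v <;> simp [h1, h2]
      have hd : (decide (v ∉ s)) = true := by simpa using h
      rw [if_neg h]
      simp only [hd, if_true, ih, hl]
      conv_rhs => rw [kf.eq_2]
      
theorem modify_array_alt_eq (arr : List Int) :
    modify_array_alt arr = dedupLast (pvT arr) := by
  have hc : (fun (st : PySem.Set Int × List Int) v =>
      if PySem.Set.contains st.1 v then st else (PySem.Set.add st.1 v, st.2 ++ [v]))
      = (fun (st : PySem.Set Int × List Int) v =>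
      if v ∈ st.1 then st else (PySem.Set.add st.1 v, st.2 ++ [v])) := by
    funext st v
    simp [PySem.Set.contains, List.contains_eq_mem]
  simp only [modify_array_alt, hc]
  rw [foldl_loopB, List.nil_append, loopB_eq_kf_filter]
  have hfil : (((pvT arr).reverse).filter (fun x => x ∉ PySem.Set.empty))
      = (pvT arr).reverse := by
    apply List.filter_eq_self.mpr
    intro x _
    simp [PySem.Set.empty]
  rw [dedupLast_eq_kf_reverse]
  simp only [pvT] at hfil ⊢
  rw [hfil]

-- ===== VERDICT (by name: the statement is the Claim_ definition above) =====
theorem modify_array_spec : Claim_equal_modify_array := by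
  intro arr _
  unfold Spec_modify_array
  rw [modify_array_eq_dedupLast, modify_array_alt_eq]
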